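-- pv_equiv track=rewrite | github.com/slavah8/leetcode | 3746-minimum-string-length-after-balanced-removals/3746-minimum-string-length-after-balanced-removals.py | minLengthAfterRemovals
-- ===== SOURCE A (Python) =====
-- def minLengthAfterRemovals(s: str) -> int:
--
--     stack = []
--     for i, char in enumerate(s):
--         if stack and char != stack[-1]:
--             stack.pop()
--         else:
--             stack.append(char)
--
--     return len(stack)
-- ===== SOURCE B (Python) =====
-- def minLengthAfterRemovals(s: str) -> int:
--     # Stage 1: run-length encode the string into maximal runs (char, length).
--     runs = []
--     for ch in s:
--         if runs and runs[-1][0] == ch: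
--             runs[-1] = (runs[-1][0], runs[-1][1] + 1)
--         else:
--             runs.append((ch, 1))
--     # Stage 2: fold over the runs with pure arithmetic on run lengths.
--     cur, cnt = None, 0
--     for c, m in runs:
--         if cnt == 0 or cur == c:
--             cur, cnt = c, cnt + m
--         elif m <= cnt:
--             cnt -= m
--         else:
--             cur, cnt = c, m - cnt
--     return cnt
-- ===== Notes on version B (the rewrite author's own statement) =====
-- stated objective: alternative
-- what changed: Replaces the per-character stack simulation by a two-stage algorithm: run-length encode the string into maximal runs, then fold over the runs with pure arithmetic (each whole run is consumed in one subtract/add step instead of one stack operation per character).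
import Mathlib
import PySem

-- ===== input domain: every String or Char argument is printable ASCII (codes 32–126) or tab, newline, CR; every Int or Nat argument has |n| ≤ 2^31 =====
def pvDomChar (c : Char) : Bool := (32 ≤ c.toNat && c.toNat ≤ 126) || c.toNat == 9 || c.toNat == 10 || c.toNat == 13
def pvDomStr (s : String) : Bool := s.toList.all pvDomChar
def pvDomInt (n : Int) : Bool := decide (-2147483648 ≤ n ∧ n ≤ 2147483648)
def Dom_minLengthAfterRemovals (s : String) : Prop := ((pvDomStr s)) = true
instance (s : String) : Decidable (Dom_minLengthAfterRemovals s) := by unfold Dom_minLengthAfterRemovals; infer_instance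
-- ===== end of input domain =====

-- ===== PORT A =====
-- B computes A's result by run-length encoding the string and folding arithmetic over
-- the runs instead of simulating a per-character stack; return value only.
def pvStepA (stack : List Char) (ch : Char) : List Char :=
  match stack.getLast? with
  | some t => if ch ≠ t then stack.dropLast else stack ++ [ch]
  | none => stack ++ [ch]

def minLengthAfterRemovals (s : String) : Int :=
  ((s.toList.foldl pvStepA []).length : Int)

-- ===== PORT B =====
-- stage 1 of Source B: run-length encode into maximal runs (char, length)
def pvRleInsert (runs : List (Char × Int)) (ch : Char) : List (Char × Int) :=
  match runs.getLast? with
  | some (c, m) => if c = ch then runs.dropLast ++ [(c, m + 1)] else runs ++ [(ch, 1)]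
  | none => runs ++ [(ch, 1)]

-- stage 2 of Source B: arithmetic fold over the runs
def pvRunStep (st : Option Char × Int) (r : Char × Int) : Option Char × Int :=
  if st.2 = 0 ∨ st.1 = some r.1 then (some r.1, st.2 + r.2)
  else if r.2 ≤ st.2 then (st.1, st.2 - r.2)
  else (some r.1, r.2 - st.2)

def minLengthAfterRemovals_alt (s : String) : Int :=
  ((s.toList.foldl pvRleInsert []).foldl pvRunStep (none, 0)).2

-- ===== PRECONDITION & SPEC =====
def Spec_minLengthAfterRemovals (s : String) (out : Int) : Prop := out = minLengthAfterRemovals_alt s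
instance (s : String) (out : Int) : Decidable (Spec_minLengthAfterRemovals s out) := by unfold Spec_minLengthAfterRemovals; infer_instance

-- ===== CLAIM (what is proved, stated in full; the proofs are below) =====
def Claim_equal_minLengthAfterRemovals : Prop := ∀ (s : String), Dom_minLengthAfterRemovals s → Spec_minLengthAfterRemovals s (minLengthAfterRemovals s)

-- ===== LEMMAS AND PROOFS =====

-- proof-only intermediate: the scalar (last kept char, count) per-character step
def pvStepB (st : Option Char × Int) (ch : Char) : Option Char × Int :=
  if 0 < st.2 ∧ st.1 ≠ some ch then (st.1, st.2 - 1)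
  else (some ch, st.2 + 1)

-- the run fold, named for the proofs
def pvF (runs : List (Char × Int)) : Option Char × Int := runs.foldl pvRunStep (none, 0)

-- A's stack fold agrees with the scalar per-character fold (homogeneous-stack invariant)
theorem pvStepA_nil (ch : Char) : pvStepA [] ch = [ch] := rfl

theorem pvStepA_last {stack : List Char} {t : Char} (h : stack.getLast? = some t) (ch : Char) :
    pvStepA stack ch = if ch ≠ t then stack.dropLast else stack ++ [ch] := by
  unfold pvStepA; rw [h]

theorem pv_key (l : List Char) (n : Nat) (cur : Option Char) (stack : List Char)
    (hinv : n = 0 ∨ ∃ c, cur = some c ∧ stack = List.replicate n c)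
    (hlen : stack.length = n) :
    ((l.foldl pvStepA stack).length : Int) = (l.foldl pvStepB (cur, (n : Int))).2 := by
  induction l generalizing n cur stack with
  | nil => simp [hlen]
  | cons ch l ih =>
    match n, hinv with
    | 0, _ =>
      have hstack : stack = [] := List.eq_nil_of_length_eq_zero hlen
      subst hstack
      rw [List.foldl_cons, List.foldl_cons, pvStepA_nil]
      have hB : pvStepB (cur, ((0:Nat) : Int)) ch = (some ch, ((1:Nat) : Int)) := by
        unfold pvStepB; norm_num
      rw [hB]
      exact ih 1 (some ch) [ch] (Or.inr ⟨ch, rfl, rfl⟩) rfl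
    | (k+1), Or.inr ⟨c, hc, hs⟩ =>
      subst hc; subst hs
      rw [List.foldl_cons, List.foldl_cons]
      have hlast : (List.replicate (k+1) c).getLast? = some c := by
        rw [List.replicate_succ']; simp
      rw [pvStepA_last hlast]
      by_cases hch : ch = c
      · subst hch
        rw [if_neg (by simp)]
        have hB : pvStepB (some ch, ((k+1 : Nat) : Int)) ch = (some ch, ((k+2 : Nat) : Int)) := by
          unfold pvStepB
          rw [if_neg (by simp)]
          push_cast; ring_nf
        rw [hB]
        have hrep : List.replicate (k+1) ch ++ [ch] = List.replicate (k+2) ch := by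
          rw [← List.replicate_succ']
        rw [hrep]
        exact ih (k+2) (some ch) (List.replicate (k+2) ch) (Or.inr ⟨ch, rfl, rfl⟩) (by simp)
      · rw [if_pos (by simpa using hch)]
        have hB : pvStepB (some c, ((k+1 : Nat) : Int)) ch = (some c, ((k : Nat) : Int)) := by
          unfold pvStepB
          rw [if_pos (⟨by push_cast; positivity, by simpa using fun h => hch h.symm⟩ :
            0 < ((some c, ((k+1 : Nat) : Int)).2) ∧ (some c, ((k+1 : Nat) : Int)).1 ≠ some ch)]
          push_cast; ring_nf
        rw [hB]
        have hdrop : (List.replicate (k+1) c).dropLast = List.replicate k c := by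
          rw [List.replicate_succ']; simp
        rw [hdrop]
        exact ih k (some c) (List.replicate k c) (Or.inr ⟨c, rfl, rfl⟩) (by simp)

-- run-step facts
theorem pvRunStep_nonneg (st : Option Char × Int) (r : Char × Int)
    (h : 0 ≤ st.2) (hr : 1 ≤ r.2) : 0 ≤ (pvRunStep st r).2 := by
  unfold pvRunStep; split_ifs <;> simp <;> omega

theorem pvF_nonneg_aux (R : List (Char × Int)) (st : Option Char × Int)
    (h : 0 ≤ st.2) (hR : ∀ p ∈ R, 1 ≤ p.2) : 0 ≤ (R.foldl pvRunStep st).2 := by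
  induction R generalizing st with
  | nil => simpa using h
  | cons r R ih =>
    rw [List.foldl_cons]
    exact ih _ (pvRunStep_nonneg st r h (hR r (by simp))) (fun p hp => hR p (by simp [hp]))

theorem pvF_nonneg (R : List (Char × Int)) (hR : ∀ p ∈ R, 1 ≤ p.2) :
    0 ≤ (pvF R).2 := pvF_nonneg_aux R (none, 0) (by norm_num) hR

-- a run of length 1 behaves like one per-character step
theorem pvRunStep_one (st : Option Char × Int) (ch : Char) (h : 0 ≤ st.2) :
    pvRunStep st (ch, 1) = pvStepB st ch := by
  obtain ⟨cur, k⟩ := st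
  unfold pvRunStep pvStepB
  by_cases hc : cur = some ch <;> split_ifs <;> simp_all <;> omega

-- extending the last run by one behaves like one per-character step of the same char
theorem pvRunStep_succ (st : Option Char × Int) (c : Char) (m : Int)
    (h : 0 ≤ st.2) (_hm : 1 ≤ m) :
    pvRunStep st (c, m + 1) = pvStepB (pvRunStep st (c, m)) c := by
  obtain ⟨cur, k⟩ := st
  unfold pvRunStep pvStepB
  by_cases hc : cur = some c <;> split_ifs <;> simp_all <;> omega

-- the RLE insertion commutes with the run fold into a per-character step
theorem pvF_insert (R : List (Char × Int)) (ch : Char) (hR : ∀ p ∈ R, 1 ≤ p.2) :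
    pvF (pvRleInsert R ch) = pvStepB (pvF R) ch := by
  cases h : R.getLast? with
  | none =>
    have hnil : R = [] := List.getLast?_eq_none_iff.mp h
    subst hnil
    have hins : pvRleInsert [] ch = [(ch, 1)] := rfl
    rw [hins]
    simp only [pvF, List.foldl_cons, List.foldl_nil]
    exact pvRunStep_one (none, 0) ch (by norm_num)
  | some p =>
    obtain ⟨c, m⟩ := p
    obtain ⟨R', rfl⟩ := List.getLast?_eq_some_iff.mp h
    have hR' : ∀ q ∈ R', 1 ≤ q.2 := fun q hq => hR q (by simp [hq])
    have hm : 1 ≤ m := hR (c, m) (by simp)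
    have hnn : 0 ≤ (pvF R').2 := pvF_nonneg R' hR'
    by_cases hc : c = ch
    · subst hc
      have hins : pvRleInsert (R' ++ [(c, m)]) c = R' ++ [(c, m + 1)] := by
        simp [pvRleInsert, h]
      rw [hins]
      simp only [pvF, List.foldl_append, List.foldl_cons, List.foldl_nil]
      exact pvRunStep_succ (R'.foldl pvRunStep (none, 0)) c m hnn hm
    · have hins : pvRleInsert (R' ++ [(c, m)]) ch = (R' ++ [(c, m)]) ++ [(ch, 1)] := by
        simp [pvRleInsert, hc]
      rw [hins]
      simp only [pvF, List.foldl_append, List.foldl_cons, List.foldl_nil]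
      exact pvRunStep_one _ ch (pvRunStep_nonneg _ _ hnn hm)

-- the RLE insertion keeps all run lengths positive
theorem pvRleInsert_wf (R : List (Char × Int)) (ch : Char) (hR : ∀ p ∈ R, 1 ≤ p.2) :
    ∀ p ∈ pvRleInsert R ch, 1 ≤ p.2 := by
  cases h : R.getLast? with
  | none =>
    have hnil : R = [] := List.getLast?_eq_none_iff.mp h
    subst hnil
    intro p hp; simp [pvRleInsert] at hp; subst hp; norm_num
  | some q =>
    obtain ⟨c, m⟩ := q
    obtain ⟨R', rfl⟩ := List.getLast?_eq_some_iff.mp h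
    have hm : 1 ≤ m := hR (c, m) (by simp)
    have hR' : ∀ q ∈ R', 1 ≤ q.2 := fun q hq => hR q (by simp [hq])
    by_cases hc : c = ch
    · have hins : pvRleInsert (R' ++ [(c, m)]) ch = R' ++ [(c, m + 1)] := by
        simp [pvRleInsert, hc]
      rw [hins]
      intro p hp
      rcases List.mem_append.mp hp with h' | h'
      · exact hR' p h'
      · simp at h'; subst h'; simpa using by omega
    · have hins : pvRleInsert (R' ++ [(c, m)]) ch = (R' ++ [(c, m)]) ++ [(ch, 1)] := by
        simp [pvRleInsert, hc]
      rw [hins]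
      intro p hp
      rcases List.mem_append.mp hp with h' | h'
      · exact hR p h'
      · simp at h'; subst h'; norm_num

-- main bridge: folding runs built by RLE equals the scalar per-character fold
theorem pv_main (l : List Char) (R : List (Char × Int)) (hR : ∀ p ∈ R, 1 ≤ p.2) :
    pvF (l.foldl pvRleInsert R) = l.foldl pvStepB (pvF R) := by
  induction l generalizing R with
  | nil => rfl
  | cons ch l ih =>
    rw [List.foldl_cons, List.foldl_cons, ← pvF_insert R ch hR]
    exact ih (pvRleInsert R ch) (pvRleInsert_wf R ch hR)

-- ===== VERDICT (by name: the statement is the Claim_ definition above) =====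
theorem minLengthAfterRemovals_spec : Claim_equal_minLengthAfterRemovals := by
  intro s _
  unfold Spec_minLengthAfterRemovals minLengthAfterRemovals minLengthAfterRemovals_alt
  have h1 := pv_key s.toList 0 none [] (Or.inl rfl) rfl
  have h2 := pv_main s.toList [] (by simp)
  simp only [pvF, List.foldl_nil] at h2
  simp only [Nat.cast_zero] at h1
  rw [h1, ← h2]
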